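-- pv_equiv track=rewrite | github.com/Hiranya36/Virtual-vita | backend/app/api/chat.py | _first_question_only
-- ===== SOURCE A (Python) =====
-- def _first_question_only(text):
--     text = (text or "").strip()
--     if not text:
--         return "Could you tell me more about your symptoms?"
--     lines = [ln.strip() for ln in text.splitlines() if ln.strip()]
--     merged = " ".join(lines)
--     q_idx = merged.find("?")
--     if q_idx == -1:
--         return merged
--     prefix = merged[: q_idx + 1]
--     # Drop additional trailing questions if the model generated several.
--     return prefix
-- ===== SOURCE B (Python) =====
-- def _first_question_only(text):
--     text = (text or "").strip()
--     if not text: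
--         return "Could you tell me more about your symptoms?"
--     completed = []
--     for raw in text.splitlines():
--         line = raw.strip()
--         if not line:
--             continue
--         i = line.find("?")
--         if i != -1:
--             completed.append(line[: i + 1])
--             return " ".join(completed)
--         completed.append(line)
--     return " ".join(completed)
-- ===== Notes on version B (the rewrite author's own statement) =====
-- stated objective: alternative
-- what changed: B scans the cleaned lines once with an accumulator and returns as soon as a line contains a question mark, cutting that line locally, instead of A's join-all-lines-then-global-find-then-slice; correctness rests on the single-space separator never containing a question mark.
import Mathlib
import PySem

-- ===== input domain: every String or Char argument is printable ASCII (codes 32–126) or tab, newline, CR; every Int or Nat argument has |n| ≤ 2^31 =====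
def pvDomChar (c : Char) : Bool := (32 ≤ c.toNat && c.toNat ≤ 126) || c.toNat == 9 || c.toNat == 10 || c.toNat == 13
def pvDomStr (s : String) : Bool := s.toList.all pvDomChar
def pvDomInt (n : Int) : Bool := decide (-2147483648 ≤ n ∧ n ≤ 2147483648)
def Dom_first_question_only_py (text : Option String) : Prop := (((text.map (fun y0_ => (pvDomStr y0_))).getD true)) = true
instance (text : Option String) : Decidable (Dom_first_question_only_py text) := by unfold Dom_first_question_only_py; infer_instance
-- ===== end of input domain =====

set_option maxHeartbeats 1000000


-- B replaces A's join-then-global-find-then-slice by a single pass over the lines that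
-- returns as soon as a line contains '?' (alternative decomposition; same cost).

-- ===== PORT A =====
def first_question_only_py (text : Option String) : String :=
  let t := PySem.Str.strip (text.getD "")
  if t = "" then "Could you tell me more about your symptoms?"
  else
    let lines := (PySem.Str.splitlines t).filterMap (fun ln =>
      let s := PySem.Str.strip ln; if s = "" then none else some s)
    let merged := PySem.Str.join " " lines
    let q := PySem.Str.find merged "?"
    if q = -1 then merged
    else PySem.Str.slice merged none (some (q + 1))

-- ===== PORT B =====
-- B's loop over text.splitlines() with the `completed` accumulator and early return
def fqGo (acc : List String) : List String → String
  | [] => PySem.Str.join " " acc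
  | raw :: rest =>
    let line := PySem.Str.strip raw
    if line = "" then fqGo acc rest
    else
      let i := PySem.Str.find line "?"
      if i ≠ -1 then
        PySem.Str.join " " (acc ++ [PySem.Str.slice line none (some (i + 1))])
      else fqGo (acc ++ [line]) rest

def first_question_only_py_alt (text : Option String) : String :=
  let t := PySem.Str.strip (text.getD "")
  if t = "" then "Could you tell me more about your symptoms?"
  else fqGo [] (PySem.Str.splitlines t)

-- ===== PRECONDITION & SPEC =====
def Spec_first_question_only_py (text : Option String) (out : String) : Prop := out = first_question_only_py_alt text
instance (text : Option String) (out : String) : Decidable (Spec_first_question_only_py text out) := by unfold Spec_first_question_only_py; infer_instance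

-- ===== CLAIM (what is proved, stated in full; the proofs are below) =====
def Claim_equal_first_question_only_py : Prop := ∀ (text : Option String), Dom_first_question_only_py text → Spec_first_question_only_py text (first_question_only_py text)

-- ===== LEMMAS AND PROOFS =====

-- [c] is an infix of s iff c is an element of s
theorem pv_infix_singleton (c : Char) (s : List Char) : [c] <:+: s ↔ c ∈ s := by
  constructor
  · intro h
    exact (List.singleton_sublist).mp h.sublist
  · intro h
    obtain ⟨u, v, rfl⟩ := List.append_of_mem h
    exact ⟨u, v, by simp⟩

theorem pv_prefix_singleton_drop (c : Char) (s : List Char) (n : Nat) :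
    [c] <+: s.drop n ↔ s[n]? = some c := by
  rw [← List.head?_drop]
  cases hd : List.drop n s with
  | nil => simp
  | cons a b => simp [List.cons_prefix_cons, eq_comm]

-- Chars.find with a single-character needle is List.findIdx?
theorem pv_find_singleton (s : List Char) (c : Char) :
    PySem.Chars.find s [c] = ((List.findIdx? (· == c) s).map (fun k => (k : Int))).getD (-1) := by
  cases h : List.findIdx? (· == c) s with
  | none =>
    rw [List.findIdx?_eq_none_iff] at h
    have hnm : c ∉ s := fun hc => by simpa using h c hc
    have : ¬ [c] <:+: s := fun hi => hnm ((pv_infix_singleton c s).mp hi)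
    simp [(PySem.Chars.find_eq_neg_one_iff s [c]).mpr this]
  | some i =>
    rw [List.findIdx?_eq_some_iff_getElem] at h
    obtain ⟨hi, hpi, hmin⟩ := h
    have hcs : s[i] = c := by simpa using hpi
    have hci : c ∈ s := hcs ▸ List.getElem_mem hi
    have hne : PySem.Chars.find s [c] ≠ -1 := by
      rw [Ne, PySem.Chars.find_eq_neg_one_iff]
      simp [pv_infix_singleton, hci]
    have hle : -1 ≤ PySem.Chars.find s [c] := PySem.Chars.neg_one_le_find s [c]
    have hnn : 0 ≤ PySem.Chars.find s [c] := by omega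
    obtain ⟨hpre, hminf⟩ := PySem.Chars.find_spec hnn
    set n := (PySem.Chars.find s [c]).toNat with hn
    have hsn : s[n]? = some c := (pv_prefix_singleton_drop c s n).mp hpre
    obtain ⟨hnl, hcn⟩ := List.getElem?_eq_some_iff.mp hsn
    have hni : n = i := by
      rcases Nat.lt_trichotomy n i with hlt | heq | hgt
      · exact absurd (by simp [hcn] : (s[n] == c) = true) (hmin n hlt)
      · exact heq
      · exact absurd ((pv_prefix_singleton_drop c s i).mpr
          (List.getElem?_eq_some_iff.mpr ⟨hi, hcs⟩)) (hminf i hgt)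
    show PySem.Chars.find s [c] = (i : Int)
    omega

-- first '?' is absent iff '?' not a member
theorem pv_find1_eq_neg_one_iff (s : List Char) (c : Char) :
    PySem.Chars.find s [c] = -1 ↔ c ∉ s := by
  rw [PySem.Chars.find_eq_neg_one_iff, pv_infix_singleton]

theorem pv_find1_lt_length (s : List Char) (c : Char) (h : PySem.Chars.find s [c] ≠ -1) :
    (PySem.Chars.find s [c]).toNat < s.length ∧ 0 ≤ PySem.Chars.find s [c] := by
  rw [pv_find_singleton] at h ⊢
  cases hf : List.findIdx? (· == c) s with
  | none => simp [hf] at h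
  | some i =>
    have := (List.findIdx?_eq_some_iff_getElem.mp hf).1
    simp
    omega

-- find of [c] over an append
theorem pv_find1_append (a b : List Char) (c : Char) :
    PySem.Chars.find (a ++ b) [c] =
      if PySem.Chars.find a [c] = -1 then
        (if PySem.Chars.find b [c] = -1 then -1
         else (a.length : Int) + PySem.Chars.find b [c])
      else PySem.Chars.find a [c] := by
  rw [pv_find_singleton, pv_find_singleton, pv_find_singleton, List.findIdx?_append]
  cases ha : List.findIdx? (· == c) a with
  | some i => simp
  | none =>
    cases hb : List.findIdx? (· == c) b with
    | none => simp
    | some j => simp; omega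

-- membership in a joined list
theorem pv_mem_join (sep : List Char) (parts : List (List Char)) (x : Char)
    (h : x ∈ PySem.Chars.join sep parts) : x ∈ sep ∨ ∃ p ∈ parts, x ∈ p := by
  induction parts with
  | nil => simp [PySem.Chars.join_nil] at h
  | cons p ps ih =>
    cases ps with
    | nil =>
      rw [PySem.Chars.join_singleton] at h
      exact Or.inr ⟨p, by simp, h⟩
    | cons q r =>
      rw [PySem.Chars.join_cons_cons] at h
      rcases List.mem_append.mp h with h1 | h2
      · rcases List.mem_append.mp h1 with h3 | h4
        · exact Or.inr ⟨p, by simp, h3⟩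
        · exact Or.inl h4
      · rcases ih h2 with h5 | ⟨w, hw, hxw⟩
        · exact Or.inl h5
        · exact Or.inr ⟨w, by simp [hw], hxw⟩

-- join over an append with a nonempty right part
theorem pv_join_append (sep : List Char) (xs ys : List (List Char)) (hys : ys ≠ []) :
    PySem.Chars.join sep (xs ++ ys) =
      (xs.map (· ++ sep)).flatten ++ PySem.Chars.join sep ys := by
  induction xs with
  | nil => simp
  | cons x xs ih =>
    obtain ⟨q, r, hqr⟩ := List.exists_cons_of_ne_nil (by simp [hys] : xs ++ ys ≠ [])
    calc PySem.Chars.join sep ((x :: xs) ++ ys)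
        = PySem.Chars.join sep (x :: q :: r) := by rw [List.cons_append, hqr]
      _ = x ++ sep ++ PySem.Chars.join sep (q :: r) := PySem.Chars.join_cons_cons ..
      _ = x ++ sep ++ PySem.Chars.join sep (xs ++ ys) := by rw [hqr]
      _ = _ := by rw [ih]; simp

-- no '?' in the flattened prefix built from clean lines
theorem pv_flat_clean (acc : List (List Char))
    (h : ∀ a ∈ acc, PySem.Chars.find a ['?'] = -1) :
    PySem.Chars.find ((acc.map (· ++ [' '])).flatten) ['?'] = -1 := by
  rw [pv_find1_eq_neg_one_iff]
  intro hm
  obtain ⟨l, hl, hxl⟩ := List.mem_flatten.mp hm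
  obtain ⟨a, ha, rfl⟩ := List.mem_map.mp hl
  rcases List.mem_append.mp hxl with h1 | h2
  · exact ((pv_find1_eq_neg_one_iff _ _).mp (h a ha)) h1
  · simp at h2
  
theorem pv_join_clean (acc : List (List Char))
    (h : ∀ a ∈ acc, PySem.Chars.find a ['?'] = -1) :
    PySem.Chars.find (PySem.Chars.join [' '] acc) ['?'] = -1 := by
  rw [pv_find1_eq_neg_one_iff]
  intro hm
  rcases pv_mem_join [' '] acc '?' hm with h1 | ⟨p, hp, hxp⟩
  · simp at h1
  · exact ((pv_find1_eq_neg_one_iff _ _).mp (h p hp)) hxp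

-- A's core computation on a line list
def aCore (lines : List String) : String :=
  let merged := PySem.Str.join " " lines
  let q := PySem.Str.find merged "?"
  if q = -1 then merged else PySem.Str.slice merged none (some (q + 1))

theorem pv_str_q : ("?" : String).toList = ['?'] := by decide
theorem pv_str_sp : (" " : String).toList = [' '] := by decide

-- cutting at the first '?' inside l commutes with the flat prefix and the joined tail
theorem pv_take_cut (flat l tail : List Char) (iC : Int)
    (h0 : 0 ≤ iC) (hlt : iC.toNat < l.length) :
    List.take ((flat.length : Int) + iC + 1).toNat (flat ++ (l ++ tail))
      = flat ++ List.take (iC.toNat + 1) l := by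
  have hN : ((flat.length : Int) + iC + 1).toNat = flat.length + (iC.toNat + 1) := by omega
  rw [hN, List.take_append, List.take_of_length_le (by omega),
    List.take_append_of_le_length (by omega)]
  have h2 : flat.length + (iC.toNat + 1) - flat.length = iC.toNat + 1 := by omega
  rw [h2]

theorem pv_go_spec (raws : List String) : ∀ acc : List String,
    (∀ a ∈ acc, PySem.Chars.find a.toList ['?'] = -1) →
    fqGo acc raws =
      aCore (acc ++ raws.filterMap (fun ln =>
        let s := PySem.Str.strip ln; if s = "" then none else some s)) := by
  induction raws with
  | nil =>
    intro acc hacc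
    have hfind : PySem.Chars.find (PySem.Chars.join [' '] (List.map String.toList acc)) ['?'] = -1 := by
      refine pv_join_clean _ ?_
      intro a ha
      obtain ⟨x, hx, rfl⟩ := List.mem_map.mp ha
      exact hacc x hx
    simp [fqGo, aCore, hfind]
  | cons r rs ih =>
    intro acc hacc
    by_cases h0 : PySem.Str.strip r = ""
    · simpa [fqGo, h0] using ih acc hacc
    · have hC : (PySem.Str.strip r).toList = PySem.Chars.strip r.toList :=
        PySem.Str.toList_strip r
      have hfl : PySem.Str.find (PySem.Str.strip r) "?"
          = PySem.Chars.find (PySem.Chars.strip r.toList) ['?'] := by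
        rw [PySem.Str.find_eq, pv_str_q, hC]
      have hfm : List.filterMap (fun ln =>
          let s := PySem.Str.strip ln; if s = "" then none else some s) (r :: rs)
          = PySem.Str.strip r :: List.filterMap (fun ln =>
              let s := PySem.Str.strip ln; if s = "" then none else some s) rs := by
        simp [h0]
      by_cases h1 : PySem.Chars.find (PySem.Chars.strip r.toList) ['?'] = -1
      · -- no '?' in this line: it joins the accumulator
        have hstep : fqGo acc (r :: rs) = fqGo (acc ++ [PySem.Str.strip r]) rs := by
          simp [fqGo, h0, h1]
        have hclean : ∀ a ∈ acc ++ [PySem.Str.strip r],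
            PySem.Chars.find a.toList ['?'] = -1 := by
          intro a ha
          rcases List.mem_append.mp ha with h | h
          · exact hacc a h
          · simp at h
            subst h
            rw [hC]
            exact h1
        rw [hstep, ih _ hclean, hfm]
        congr 1
        simp
      · -- this line holds the first '?': both sides cut it here
        have hstep : fqGo acc (r :: rs) = PySem.Str.join " "
            (acc ++ [PySem.Str.slice (PySem.Str.strip r) none
              (some (PySem.Str.find (PySem.Str.strip r) "?" + 1))]) := by
          simp [fqGo, h0, h1]
        obtain ⟨hlt, hnn⟩ := pv_find1_lt_length (PySem.Chars.strip r.toList) '?' h1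
        -- the joined tail starts with this line
        obtain ⟨tail, hJ⟩ : ∃ tail,
            PySem.Chars.join [' ']
              ((PySem.Chars.strip r.toList) ::
                (List.filterMap (fun ln =>
                  let s := PySem.Str.strip ln; if s = "" then none else some s) rs).map String.toList)
              = PySem.Chars.strip r.toList ++ tail := by
          cases hcase : (List.filterMap (fun ln =>
              let s := PySem.Str.strip ln; if s = "" then none else some s) rs).map String.toList with
          | nil => exact ⟨[], by rw [PySem.Chars.join_singleton, List.append_nil]⟩
          | cons q r' => exact ⟨[' '] ++ PySem.Chars.join [' '] (q :: r'),
              by rw [PySem.Chars.join_cons_cons, List.append_assoc]⟩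
        have hflatclean : PySem.Chars.find
            (((acc.map String.toList).map (· ++ [' '])).flatten) ['?'] = -1 := by
          refine pv_flat_clean _ ?_
          intro a ha
          obtain ⟨x, hx, rfl⟩ := List.mem_map.mp ha
          exact hacc x hx
        have hmergedL : (PySem.Str.join " " (acc ++ PySem.Str.strip r ::
            List.filterMap (fun ln =>
              let s := PySem.Str.strip ln; if s = "" then none else some s) rs)).toList
            = ((acc.map String.toList).map (· ++ [' '])).flatten ++
              (PySem.Chars.strip r.toList ++ tail) := by
          rw [PySem.Str.toList_join, pv_str_sp, List.map_append,
            pv_join_append [' '] _ _ (by simp), List.map_cons, hC, hJ]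
        have hq : PySem.Str.find (PySem.Str.join " " (acc ++ PySem.Str.strip r ::
            List.filterMap (fun ln =>
              let s := PySem.Str.strip ln; if s = "" then none else some s) rs)) "?"
            = ((((acc.map String.toList).map (· ++ [' '])).flatten).length : Int)
              + PySem.Chars.find (PySem.Chars.strip r.toList) ['?'] := by
          have hfJ : PySem.Chars.find (PySem.Chars.strip r.toList ++ tail) ['?']
              = PySem.Chars.find (PySem.Chars.strip r.toList) ['?'] := by
            rw [pv_find1_append, if_neg h1]
          rw [PySem.Str.find_eq, pv_str_q, hmergedL, pv_find1_append, if_pos hflatclean,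
            hfJ, if_neg h1]
        rw [hstep, hfm, aCore]
        simp only [hq]
        rw [if_neg (by omega)]
        refine String.toList_inj.mp ?_
        rw [PySem.Str.toList_join, pv_str_sp, List.map_append,
          pv_join_append [' '] _ _ (by simp), List.map_cons, List.map_nil,
          PySem.Chars.join_singleton, PySem.Str.toList_slice,
          PySem.Chars.slice_eq_listSlice, PySem.List.slice_to _ (by rw [hfl]; omega),
          PySem.Str.toList_slice, hmergedL, PySem.Chars.slice_eq_listSlice,
          PySem.List.slice_to _ (by omega), pv_take_cut _ _ _ _ hnn hlt, hC, hfl]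
        congr 2
        omega

-- ===== VERDICT (by name: the statement is the Claim_ definition above) =====
theorem first_question_only_py_spec : Claim_equal_first_question_only_py := by
  intro text _
  show first_question_only_py text = first_question_only_py_alt text
  unfold first_question_only_py first_question_only_py_alt
  by_cases h : PySem.Str.strip (text.getD "") = ""
  · rw [if_pos h, if_pos h]
  · rw [if_neg h, if_neg h, pv_go_spec _ [] (by simp), List.nil_append]
    rfl
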